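-- pv_equiv track=rewrite | github.com/suleiman-odeh/Detect-malicious-VSscoe-extensions | Detection of typosquatting and name collision/typo_technique.py | common_typo
-- ===== SOURCE A (Python) =====
-- adjacent_keys = {
--     'e': ['r', 's'],
--     'E': ['R', 'S'],
--     's': ['e', 'd'],
--     'S': ['E', 'D'],
--     'd': ['s', 'r'],
--     'D': ['S', 'R'],
--     'f': ['g'],
--     'F': ['G'],
--     'g': ['f'],
--     'G': ['F'],
--     'p': ['o'],
--     'P': ['O'],
--     'r': ['e', 't'],
--     'R': ['E', 'T'],
--     'u': ['i'],
--     'U': ['I'],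
--     'i': ['u'],
--     'I': ['U'],
--     'o': ['p', '0'],
--     'O': ['P', '0'],
--     '0': ['o', 'O'],
-- }
--
-- def common_typo(badextension,goodextension):
--
--     if len(badextension)!= len(goodextension):
--         return False
--     i=0
--     while i< len(badextension):
--         if badextension[i] == goodextension[i]:
--             badextension = badextension[:i] + badextension[i + 1:]
--             goodextension = goodextension[:i] + goodextension[i + 1:]
--         else:
--             i += 1
--
--     if len(badextension) != len(goodextension):
--         return False
--     if len(badextension)==1:
--         if badextension[0] in adjacent_keys.get(goodextension[0], []):
--             return True
--
--     return False
-- ===== SOURCE B (Python) =====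
-- adjacent_keys = {
--     'e': ['r', 's'],
--     'E': ['R', 'S'],
--     's': ['e', 'd'],
--     'S': ['E', 'D'],
--     'd': ['s', 'r'],
--     'D': ['S', 'R'],
--     'f': ['g'],
--     'F': ['G'],
--     'g': ['f'],
--     'G': ['F'],
--     'p': ['o'],
--     'P': ['O'],
--     'r': ['e', 't'],
--     'R': ['E', 'T'],
--     'u': ['i'],
--     'U': ['I'],
--     'i': ['u'],
--     'I': ['U'],
--     'o': ['p', '0'],
--     'O': ['P', '0'],
--     '0': ['o', 'O'],
-- }
--
-- def common_typo(badextension, goodextension):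
--     if len(badextension) != len(goodextension):
--         return False
--     pair = None
--     for i in range(len(badextension)):
--         b, g = badextension[i], goodextension[i]
--         if b != g:
--             if pair is not None:
--                 return False
--             pair = (b, g)
--     return pair is not None and pair[0] in adjacent_keys.get(pair[1], [])
-- ===== Notes on version B (the rewrite author's own statement) =====
-- stated objective: faster
-- what changed: Replaces A's quadratic delete-equal-characters-by-string-slicing loop with a single indexed pass that carries the (at most one) mismatched character pair in an accumulator and exits early on a second mismatch.
import Mathlib
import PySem

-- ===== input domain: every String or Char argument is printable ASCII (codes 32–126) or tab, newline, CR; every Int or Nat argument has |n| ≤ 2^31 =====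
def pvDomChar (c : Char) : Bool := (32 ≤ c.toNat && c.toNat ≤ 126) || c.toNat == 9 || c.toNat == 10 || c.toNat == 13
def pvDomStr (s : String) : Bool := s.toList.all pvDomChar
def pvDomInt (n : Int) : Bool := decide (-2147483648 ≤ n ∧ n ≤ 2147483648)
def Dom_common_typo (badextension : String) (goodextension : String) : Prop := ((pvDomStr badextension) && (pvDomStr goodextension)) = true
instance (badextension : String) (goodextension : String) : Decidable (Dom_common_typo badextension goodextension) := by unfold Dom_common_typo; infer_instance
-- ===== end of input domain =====

-- B replaces A's quadratic delete-equal-characters-by-slicing loop with one linear indexed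
-- pass carrying the (at most one) mismatched pair in an accumulator (objective: faster).

-- shared table: Python's adjacent_keys.get(c, []) (both programs use the same module constant)
def adjacentGet : Char → List Char
  | 'e' => ['r', 's']
  | 'E' => ['R', 'S']
  | 's' => ['e', 'd']
  | 'S' => ['E', 'D']
  | 'd' => ['s', 'r']
  | 'D' => ['S', 'R']
  | 'f' => ['g']
  | 'F' => ['G']
  | 'g' => ['f']
  | 'G' => ['F']
  | 'p' => ['o']
  | 'P' => ['O']
  | 'r' => ['e', 't']
  | 'R' => ['E', 'T']
  | 'u' => ['i']
  | 'U' => ['I']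
  | 'i' => ['u']
  | 'I' => ['U']
  | 'o' => ['p', '0']
  | 'O' => ['P', '0']
  | '0' => ['o', 'O']
  | _ => []

-- ===== PORT A =====
-- A's while loop: delete position i from both strings when the characters agree,
-- else advance i.  gs.getD i ' ' is exact on all reachable states (the loop keeps
-- the two lists the same length, so the index is always in range for gs too).
def loopA (bs gs : List Char) (i : Nat) : List Char × List Char :=
  if h : i < bs.length then
    if bs[i] = gs.getD i ' ' then
      loopA (bs.take i ++ bs.drop (i + 1)) (gs.take i ++ gs.drop (i + 1)) i
    else
      loopA bs gs (i + 1)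
  else
    (bs, gs)
termination_by bs.length - i
decreasing_by
  · simp only [List.length_append, List.length_take, List.length_drop]
    omega
  · omega

def common_typo (badextension : String) (goodextension : String) : Bool :=
  if badextension.toList.length ≠ goodextension.toList.length then false
  else
    let p := loopA badextension.toList goodextension.toList 0
    if p.1.length ≠ p.2.length then false
    else if p.1.length = 1 then
      if (adjacentGet (p.2.getD 0 ' ')).contains (p.1.getD 0 ' ') then true else false
    else false

-- ===== PORT B =====
-- B's for loop over the indices, as recursion over the two character lists: `pair`
-- is the variable that holds the unique mismatched pair seen so far (None at first);
-- a second mismatch returns False immediately (Python's early `return False`).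
def scanB : List Char → List Char → Option (Char × Char) → Bool
  | [], [], pair =>
      match pair with
      | some (x, y) => (adjacentGet y).contains x
      | none => false
  | b :: bs, g :: gs, pair =>
      if b ≠ g then
        match pair with
        | some _ => false
        | none => scanB bs gs (some (b, g))
      else scanB bs gs pair
  | _, _, _ => false   -- unreachable: scanB is only called on equal-length lists

def common_typo_alt (badextension : String) (goodextension : String) : Bool :=
  if badextension.toList.length ≠ goodextension.toList.length then false
  else scanB badextension.toList goodextension.toList none

-- ===== PRECONDITION & SPEC =====
def Spec_common_typo (badextension : String) (goodextension : String) (out : Bool) : Prop := out = common_typo_alt badextension goodextension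
instance (badextension : String) (goodextension : String) (out : Bool) : Decidable (Spec_common_typo badextension goodextension out) := by unfold Spec_common_typo; infer_instance

-- ===== CLAIM (what is proved, stated in full; the proofs are below) =====
def Claim_equal_common_typo : Prop := ∀ (badextension : String) (goodextension : String), Dom_common_typo badextension goodextension → Spec_common_typo badextension goodextension (common_typo badextension goodextension)

-- ===== LEMMAS AND PROOFS =====

-- common normal form of both programs: true iff the list of mismatched pairs is a
-- singleton [(x, y)] with x adjacent to y
def onePair : List (Char × Char) → Bool
  | [(x, y)] => (adjacentGet y).contains x
  | _ => false

-- A's loop produces exactly: positions < i kept verbatim, the rest filtered to mismatches.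
theorem loopA_spec (bs gs : List Char) (i : Nat) (hlen : bs.length = gs.length) :
    loopA bs gs i =
      ((((bs.zip gs).take i ++ ((bs.zip gs).drop i).filter (fun q => q.1 ≠ q.2)).map Prod.fst),
       (((bs.zip gs).take i ++ ((bs.zip gs).drop i).filter (fun q => q.1 ≠ q.2)).map Prod.snd)) := by
  induction bs, gs, i using loopA.induct with
  | case1 bs gs i h heq ih =>
    have hig : i < gs.length := hlen ▸ h
    have hiz : i < (bs.zip gs).length := by simp [List.length_zip]; omega
    rw [loopA]; simp only [h, heq, dif_pos, if_pos]
    have hlen' : (bs.take i ++ bs.drop (i + 1)).length = (gs.take i ++ gs.drop (i + 1)).length := by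
      simp; omega
    rw [ih hlen']
    have t1 : (bs.take i).zip (gs.take i) = (bs.zip gs).take i := by
      simp [List.zip, List.take_zipWith]
    have t2 : (bs.drop (i + 1)).zip (gs.drop (i + 1)) = (bs.zip gs).drop (i + 1) := by
      simp [List.zip, List.drop_zipWith]
    have hz : (bs.take i ++ bs.drop (i + 1)).zip (gs.take i ++ gs.drop (i + 1))
        = (bs.zip gs).take i ++ (bs.zip gs).drop (i + 1) := by
      rw [List.zip_append (by simp; omega), t1, t2]
    rw [hz]
    have htake : ((bs.zip gs).take i ++ (bs.zip gs).drop (i + 1)).take i = (bs.zip gs).take i := by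
      rw [List.take_append_of_le_length (by simp; omega), List.take_take]
      simp
    have hdrop : ((bs.zip gs).take i ++ (bs.zip gs).drop (i + 1)).drop i = (bs.zip gs).drop (i + 1) := by
      rw [List.drop_append_of_le_length (by simp; omega)]
      simp
    have hget : (bs.zip gs)[i] = (bs[i], gs[i]) := by
      simp [List.getElem_zip]
    have hdropcons : (bs.zip gs).drop i = (bs.zip gs)[i] :: (bs.zip gs).drop (i + 1) :=
      List.drop_eq_getElem_cons hiz
    have heq' : bs[i] = gs[i] := by
      simpa [List.getD, List.getElem?_eq_getElem hig] using heq
    have hnm : ¬ (bs[i] ≠ gs[i]) := not_not_intro heq'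
    rw [htake, hdrop, hdropcons, hget]
    simp [hnm]
  | case2 bs gs i h hne ih =>
    have hig : i < gs.length := hlen ▸ h
    have hiz : i < (bs.zip gs).length := by simp [List.length_zip]; omega
    rw [loopA]; simp only [h, hne, dif_pos]
    rw [ih hlen]
    have hget : (bs.zip gs)[i] = (bs[i], gs[i]) := by simp [List.getElem_zip]
    have hdropcons : (bs.zip gs).drop i = (bs.zip gs)[i] :: (bs.zip gs).drop (i + 1) :=
      List.drop_eq_getElem_cons hiz
    have htake : (bs.zip gs).take (i + 1) = (bs.zip gs).take i ++ [(bs.zip gs)[i]] :=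
      List.take_succ_eq_append_getElem hiz
    have hne' : bs[i] ≠ gs[i] := by
      simpa [List.getD, List.getElem?_eq_getElem hig] using hne
    rw [htake, hdropcons, hget]
    simp [hne']
  | case3 bs gs i h =>
    rw [loopA]; simp only [h]
    have hge : bs.length ≤ i := Nat.le_of_not_lt h
    have hzl : (bs.zip gs).length = bs.length := by simp [List.length_zip]; omega
    have htake : (bs.zip gs).take i = bs.zip gs := List.take_of_length_le (by omega)
    have hdrop : (bs.zip gs).drop i = [] := List.drop_of_length_le (by omega)
    rw [htake, hdrop]
    simp [List.map_fst_zip (le_of_eq hlen), List.map_snd_zip hlen.ge]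

-- B's scan: the accumulator prepended to the remaining mismatches must be a singleton.
theorem scanB_spec (bs : List Char) : ∀ (gs : List Char) (pair : Option (Char × Char)),
    bs.length = gs.length →
    scanB bs gs pair = onePair (pair.toList ++ (bs.zip gs).filter (fun q => q.1 ≠ q.2)) := by
  induction bs with
  | nil =>
    intro gs pair hlen
    have : gs = [] := List.eq_nil_of_length_eq_zero hlen.symm
    subst this
    cases pair with
    | none => simp [scanB, onePair]
    | some p => cases p; simp [scanB, onePair]
  | cons b bs ih =>
    intro gs pair hlen
    cases gs with
    | nil => simp at hlen
    | cons g gs' =>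
      have hlen' : bs.length = gs'.length := by simpa using hlen
      by_cases hbg : b = g
      · have : ¬ (b ≠ g) := not_not_intro hbg
        simp only [scanB, this, List.zip_cons_cons, List.filter_cons]
        rw [ih gs' pair hlen']
        simp
      · simp only [scanB, hbg, ne_eq, not_false_iff, if_pos, List.zip_cons_cons,
          List.filter_cons]
        cases pair with
        | none =>
          rw [ih gs' (some (b, g)) hlen']
          simp
        | some p =>
          cases p
          simp [onePair]

theorem common_typo_spec : Claim_equal_common_typo := by
  intro b g _
  unfold Spec_common_typo common_typo common_typo_alt
  by_cases hlen : b.toList.length = g.toList.length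
  · rw [if_neg (not_not_intro hlen), if_neg (not_not_intro hlen)]
    rw [loopA_spec _ _ 0 hlen, scanB_spec _ _ none hlen]
    simp only [List.take_zero, List.drop_zero, List.nil_append, Option.toList_none]
    match hM : (b.toList.zip g.toList).filter (fun q => !decide (q.1 = q.2)) with
    | [] => simp [hM, onePair]
    | [(x, y)] => simp [hM, onePair, List.getD]
    | q :: q' :: rest => simp [hM, onePair]
  · rw [if_pos hlen, if_pos hlen]
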